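-- pv_equiv track=rewrite | github.com/MitudruDutta/learnlock | src/learnlock/cli.py | _match_records
-- ===== SOURCE A (Python) =====
-- def _match_records(records: list[dict], query: str, label_key: str) -> list[dict]:
--     """Resolve numeric ids first, then exact names, then fuzzy substring matches."""
--     query = query.strip()
--     if not query:
--         return []
--
--     if query.isdigit():
--         exact_id = [record for record in records if int(record["id"]) == int(query)]
--         if exact_id:
--             return exact_id
--
--     lowered = query.casefold()
--     exact = [record for record in records if str(record[label_key]).casefold() == lowered]
--     if exact:
--         return exact
--
--     return [record for record in records if lowered in str(record[label_key]).casefold()]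
-- ===== SOURCE B (Python) =====
-- def _match_records(records: list[dict], query: str, label_key: str) -> list[dict]:
--     """Id pass first; the name resolution is rank-and-select: score every record
--     with a match tier (1 = exact name, 2 = substring, 3 = no match) in a single
--     pass while tracking the minimum tier, then return the records at the best tier."""
--     query = query.strip()
--     if not query:
--         return []
--
--     if query.isdigit():
--         target = int(query)
--         hits = [record for record in records if int(record["id"]) == target]
--         if hits:
--             return hits
--
--     lowered = query.casefold()
--     scored = []
--     best = 3
--     for record in records:
--         s = str(record[label_key]).casefold()
--         t = 1 if s == lowered else 2 if lowered in s else 3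
--         scored.append((t, record))
--         if t < best:
--             best = t
--
--     if best == 3:
--         return []
--     return [record for t, record in scored if t == best]
-- ===== Notes on version B (the rewrite author's own statement) =====
-- stated objective: alternative
-- what changed: A's staged name resolution (exact-match comprehension, then a second substring comprehension as fallback) is replaced by a rank-and-select algorithm: one pass assigns each record a match tier (1 exact, 2 substring, 3 none) while tracking the minimum tier, and the records at the best tier are selected; the numeric-id pass is kept first as in A.
import Mathlib
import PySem

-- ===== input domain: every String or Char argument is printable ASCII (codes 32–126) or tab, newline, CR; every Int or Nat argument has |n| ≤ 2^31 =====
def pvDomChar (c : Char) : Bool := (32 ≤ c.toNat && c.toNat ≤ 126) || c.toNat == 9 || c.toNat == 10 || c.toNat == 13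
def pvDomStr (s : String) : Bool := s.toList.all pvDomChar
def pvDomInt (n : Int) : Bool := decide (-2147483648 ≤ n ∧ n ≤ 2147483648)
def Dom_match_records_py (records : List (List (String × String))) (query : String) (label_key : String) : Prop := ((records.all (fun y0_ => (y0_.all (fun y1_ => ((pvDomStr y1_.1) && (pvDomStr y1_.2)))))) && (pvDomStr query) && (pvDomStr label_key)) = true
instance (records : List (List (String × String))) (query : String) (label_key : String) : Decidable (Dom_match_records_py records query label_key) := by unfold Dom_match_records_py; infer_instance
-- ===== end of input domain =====

-- One honest line: B keeps A's id pass but replaces the staged exact/substring name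
-- comprehensions by rank-and-select (tier each record 1/2/3, keep the minimum tier);
-- alternative algorithm, same value.

-- ===== PORT A =====
-- str(record[label_key]).casefold(): values are strings; casefold = lower on the ASCII domain
def pvLabel (r : List (String × String)) (label_key : String) : String :=
  PySem.Str.lower ((List.lookup label_key r).getD "")

-- A's name phase: exact comprehension, then (if empty) the substring comprehension
def pvLabelPass (records : List (List (String × String))) (lowered : String) (label_key : String) : List (List (String × String)) :=
  let exact := records.filter (fun r => pvLabel r label_key == lowered)
  if exact = [] then records.filter (fun r => PySem.Str.isIn lowered (pvLabel r label_key)) else exact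

def match_records_py (records : List (List (String × String))) (query : String) (label_key : String) : List (List (String × String)) :=
  let q := PySem.Str.strip query
  if q = "" then []
  else if PySem.Str.strIsdigit q then
    let exact_id := records.filter (fun r => ((List.lookup "id" r).bind PySem.Int.ofStr?).getD 0 == (PySem.Int.ofStr? q).getD 0)
    if exact_id = [] then pvLabelPass records (PySem.Str.lower q) label_key else exact_id
  else pvLabelPass records (PySem.Str.lower q) label_key

-- ===== PORT B =====
-- B's name tier of a record: 1 exact, 2 substring, 3 none (s bound once as in Source B)
def pvTier (lowered : String) (label_key : String) (r : List (String × String)) : Nat :=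
  let s := PySem.Str.lower ((List.lookup label_key r).getD "")
  if s == lowered then 1
  else if PySem.Str.isIn lowered s then 2
  else 3

-- B's single scoring pass: accumulate (scored, best)
def pvScorePass (records : List (List (String × String))) (lowered : String) (label_key : String) :
    List (Nat × List (String × String)) × Nat :=
  records.foldl (fun acc r =>
    let t := pvTier lowered label_key r
    (acc.1 ++ [(t, r)], if t < acc.2 then t else acc.2)) ([], 3)

-- B's name phase: select the records at the best tier
def pvRankSelect (records : List (List (String × String))) (lowered : String) (label_key : String) :
    List (List (String × String)) :=
  let p := pvScorePass records lowered label_key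
  if p.2 = 3 then []
  else (p.1.filter (fun x => x.1 == p.2)).map Prod.snd

def match_records_py_alt (records : List (List (String × String))) (query : String) (label_key : String) : List (List (String × String)) :=
  let q := PySem.Str.strip query
  if q = "" then []
  else if PySem.Str.strIsdigit q then
    let target := (PySem.Int.ofStr? q).getD 0
    let hits := records.filter (fun r => ((List.lookup "id" r).bind PySem.Int.ofStr?).getD 0 == target)
    if hits = [] then pvRankSelect records (PySem.Str.lower q) label_key else hits
  else pvRankSelect records (PySem.Str.lower q) label_key

-- ===== PRECONDITION & SPEC =====
-- Pre_ excludes exactly the inputs where Python A raises: a numeric query whose id pass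
-- hits a record without a parseable "id" (KeyError/ValueError), or a name phase that is
-- reached while some record lacks label_key (KeyError).
def Pre_match_records_py (records : List (List (String × String))) (query : String) (label_key : String) : Prop :=
  let q := PySem.Str.strip query
  q = "" ∨
    ((PySem.Str.strIsdigit q = true → ∀ r ∈ records, ((List.lookup "id" r).bind PySem.Int.ofStr?).isSome = true) ∧
      ((PySem.Str.strIsdigit q = true ∧ ∃ r ∈ records, (List.lookup "id" r).bind PySem.Int.ofStr? = PySem.Int.ofStr? q) ∨
        ∀ r ∈ records, (List.lookup label_key r).isSome = true))
instance (records : List (List (String × String))) (query : String) (label_key : String) : Decidable (Pre_match_records_py records query label_key) := by unfold Pre_match_records_py; infer_instance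

def pvWitness_match_records_py : (List (List (String × String))) × String × String :=
  ([[("id", "1"), ("name", "Ada")], [("id", "2"), ("name", "adamant")]], "Ada", "name")

def Spec_match_records_py (records : List (List (String × String))) (query : String) (label_key : String) (out : List (List (String × String))) : Prop := out = match_records_py_alt records query label_key
instance (records : List (List (String × String))) (query : String) (label_key : String) (out : List (List (String × String))) : Decidable (Spec_match_records_py records query label_key out) := by unfold Spec_match_records_py; infer_instance

-- ===== CLAIM (what is proved, stated in full; the proofs are below) =====
def Claim_equal_match_records_py : Prop := ∀ (records : List (List (String × String))) (query : String) (label_key : String), Dom_match_records_py records query label_key → Pre_match_records_py records query label_key → Spec_match_records_py records query label_key (match_records_py records query label_key)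

-- ===== LEMMAS AND PROOFS =====

-- zeta-reduced form of pvTier
theorem pvTier_def (lowered : String) (label_key : String) (r : List (String × String)) :
    pvTier lowered label_key r =
      (if PySem.Str.lower ((List.lookup label_key r).getD "") == lowered then 1
       else if PySem.Str.isIn lowered (PySem.Str.lower ((List.lookup label_key r).getD "")) then 2
       else 3) := rfl

-- the scoring pass is (tagged list, running minimum)
theorem pvScorePass_eq (records : List (List (String × String))) (lowered : String) (label_key : String) :
    pvScorePass records lowered label_key =
      (records.map (fun r => (pvTier lowered label_key r, r)),
       (records.map (pvTier lowered label_key)).foldl min 3) := by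
  unfold pvScorePass
  suffices h : ∀ (rs : List (List (String × String))) (e : List (Nat × List (String × String))) (b : Nat),
      rs.foldl (fun acc r =>
        let t := pvTier lowered label_key r
        (acc.1 ++ [(t, r)], if t < acc.2 then t else acc.2)) (e, b)
      = (e ++ rs.map (fun r => (pvTier lowered label_key r, r)),
         (rs.map (pvTier lowered label_key)).foldl min b) by
    simpa using h records [] 3
  intro rs
  induction rs with
  | nil => intro e b; simp
  | cons r rs ih =>
    intro e b
    rw [List.foldl_cons, ih]
    have hmb : (if pvTier lowered label_key r < b then pvTier lowered label_key r else b)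
        = min b (pvTier lowered label_key r) := by
      split <;> omega
    simp [hmb, List.append_assoc]

-- value of foldl min pinned by a lower bound plus attainment
theorem foldl_min_pin (l : List Nat) (b k : Nat) (hb : k ≤ b) (h1 : ∀ x ∈ l, k ≤ x)
    (h2 : k = b ∨ k ∈ l) : l.foldl min b = k := by
  induction l generalizing b with
  | nil =>
    have hk : k = b := h2.resolve_right (by simp)
    simpa using hk.symm
  | cons x l ih =>
    rw [List.foldl_cons]
    have hkx : k ≤ x := h1 x (by simp)
    have hmin : k ≤ min b x := le_min hb hkx
    refine ih (min b x) hmin (fun y hy => h1 y (List.mem_cons_of_mem _ hy)) ?_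
    rcases h2 with h | h
    · left; omega
    · rcases List.mem_cons.mp h with h | h
      · left; omega
      · right; exact h

-- selection at tier k is the plain filter by tier
theorem select_eq_filter (records : List (List (String × String))) (f : List (String × String) → Nat) (k : Nat) :
    (((records.map (fun r => (f r, r))).filter (fun x => x.1 == k)).map Prod.snd)
      = records.filter (fun r => f r == k) := by
  induction records with
  | nil => rfl
  | cons r rs ih =>
    by_cases h : f r == k <;> simp [h, ih]

-- the tier function stays in {1, 2, 3}
theorem pvTier_bounds (lowered : String) (label_key : String) (r : List (String × String)) :
    1 ≤ pvTier lowered label_key r ∧ pvTier lowered label_key r ≤ 3 := by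
  rw [pvTier_def]; split_ifs <;> omega

-- tier 1 is exactly an exact match
theorem pvTier_one (lowered : String) (label_key : String) (r : List (String × String)) :
    pvTier lowered label_key r = 1 ↔ (pvLabel r label_key == lowered) = true := by
  rw [pvTier_def]
  unfold pvLabel
  split_ifs <;> simp_all

-- tier 2 is exactly a substring match that is not exact
theorem pvTier_two (lowered : String) (label_key : String) (r : List (String × String)) :
    pvTier lowered label_key r = 2 ↔
      ((pvLabel r label_key == lowered) = false ∧ PySem.Str.isIn lowered (pvLabel r label_key) = true) := by
  rw [pvTier_def]
  unfold pvLabel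
  split_ifs <;> simp_all

-- B's rank-and-select equals A's staged name phase
theorem rankSelect_eq_labelPass (records : List (List (String × String))) (lowered : String)
    (label_key : String) :
    pvRankSelect records lowered label_key = pvLabelPass records lowered label_key := by
  unfold pvRankSelect
  rw [pvScorePass_eq]
  set f := pvTier lowered label_key with hf
  unfold pvLabelPass
  by_cases he : records.filter (fun r => pvLabel r label_key == lowered) = []
  · -- no exact match: every tier is 2 or 3
    have hex : ∀ r ∈ records, (pvLabel r label_key == lowered) = false := by
      intro r hr
      have h := (List.filter_eq_nil_iff.mp he) r hr
      cases hb : (pvLabel r label_key == lowered)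
      · rfl
      · exact absurd hb h
    have hne1 : ∀ r ∈ records, f r ≠ 1 := by
      intro r hr h1
      have := (pvTier_one lowered label_key r).mp h1
      rw [hex r hr] at this; exact Bool.false_ne_true this
    by_cases hs : records.filter (fun r => PySem.Str.isIn lowered (pvLabel r label_key)) = []
    · -- nothing matches: best = 3, both results empty
      have hsub : ∀ r ∈ records, ¬ (PySem.Str.isIn lowered (pvLabel r label_key) = true) := by
        intro r hr
        simpa using (List.filter_eq_nil_iff.mp hs) r hr
      have hmin : (records.map f).foldl min 3 = 3 := by
        apply foldl_min_pin _ _ _ le_rfl _ (Or.inl rfl)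
        intro x hx
        rcases List.mem_map.mp hx with ⟨r, hr, rfl⟩
        have h2 : f r ≠ 2 := fun h2 => hsub r hr ((pvTier_two lowered label_key r).mp h2).2
        have h1r := hne1 r hr
        have := pvTier_bounds lowered label_key r
        rw [← hf] at this
        omega
      rw [hmin, he]
      simp only [reduceIte]
      exact hs.symm
    · -- substring matches exist: best = 2, select = substring filter
      have hmin : (records.map f).foldl min 3 = 2 := by
        apply foldl_min_pin _ _ _ (by omega)
        · intro x hx
          rcases List.mem_map.mp hx with ⟨r, hr, rfl⟩
          have h1r := hne1 r hr
          have := pvTier_bounds lowered label_key r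
          rw [← hf] at this
          omega
        · right
          rcases List.ne_nil_iff_exists_cons.mp hs with ⟨r, rs', hcons⟩
          have hr : r ∈ records.filter (fun r => PySem.Str.isIn lowered (pvLabel r label_key)) := by
            rw [hcons]; simp
          have hrm := List.mem_of_mem_filter hr
          have hsub := (List.mem_filter.mp hr).2
          exact List.mem_map.mpr ⟨r, hrm,
            (pvTier_two lowered label_key r).mpr ⟨hex r hrm, hsub⟩⟩
      rw [hmin, if_neg (by omega : ¬ (2 : Nat) = 3), select_eq_filter, he, if_pos rfl]
      apply List.filter_congr
      intro r hr
      have h2 := pvTier_two lowered label_key r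
      cases hb : PySem.Str.isIn lowered (pvLabel r label_key)
      · rw [hb] at h2
        simp only [Bool.false_eq_true, and_false, iff_false] at h2
        simpa [hf] using h2
      · simpa [hf] using h2.mpr ⟨hex r hr, hb⟩
  · -- exact matches exist: best = 1, select = exact filter
    have hmin : (records.map f).foldl min 3 = 1 := by
      apply foldl_min_pin _ _ _ (by omega)
      · intro x hx
        rcases List.mem_map.mp hx with ⟨r, hr, rfl⟩
        have := pvTier_bounds lowered label_key r
        rw [← hf] at this
        omega
      · right
        rcases List.ne_nil_iff_exists_cons.mp he with ⟨r, rs', hcons⟩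
        have hr : r ∈ records.filter (fun r => pvLabel r label_key == lowered) := by
          rw [hcons]; simp
        have hrm := List.mem_of_mem_filter hr
        exact List.mem_map.mpr ⟨r, hrm,
          (pvTier_one lowered label_key r).mpr (List.mem_filter.mp hr).2⟩
    rw [hmin, if_neg (by omega : ¬ (1 : Nat) = 3), select_eq_filter, if_neg he]
    apply List.filter_congr
    intro r hr
    have h1 := pvTier_one lowered label_key r
    cases hb : (pvLabel r label_key == lowered)
    · rw [hb] at h1
      simp only [Bool.false_eq_true, iff_false] at h1
      simpa [hf] using h1
    · rw [hb] at h1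
      simpa [hf] using h1.mpr rfl

theorem match_records_py_eq_alt (records : List (List (String × String))) (query : String) (label_key : String) :
    match_records_py records query label_key = match_records_py_alt records query label_key := by
  simp only [match_records_py, match_records_py_alt, rankSelect_eq_labelPass]

-- ===== VERDICT (by name: the statement is the Claim_ definition above) =====
theorem match_records_py_spec : Claim_equal_match_records_py := by
  intro records query label_key _ _
  show match_records_py records query label_key = match_records_py_alt records query label_key
  exact match_records_py_eq_alt records query label_key
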